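-- pv_equiv track=rewrite | github.com/IBM/nzpy | nzpy/numeric.py | mul10_and_add
-- ===== SOURCE A (Python) =====
-- MAX_NUMERIC_DIGIT_COUNT = 4
--
-- def mul10_and_add(data, adder) :
--
--     i = MAX_NUMERIC_DIGIT_COUNT - 1
--     carry = adder
--
--     while i >= 0 :
--         work = data[i]*10 + carry
--         data[i] = int(work & 0xffffffff)
--         carry = (work >> 32)
--         i -= 1
--
--     return (carry != 0) # true=> overflow
-- ===== SOURCE B (Python) =====
-- MAX_NUMERIC_DIGIT_COUNT = 4
--
-- def mul10_and_add(data, adder):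
--     # Rebuild the 128-bit value from the four 32-bit limbs, do one bignum
--     # multiply-add, then decompose back; no carry-propagation loop.
--     v = (data[0] << 96) + (data[1] << 64) + (data[2] << 32) + data[3]
--     v2 = v * 10 + adder
--     for i in range(MAX_NUMERIC_DIGIT_COUNT):
--         data[i] = (v2 >> (32 * (3 - i))) & 0xffffffff
--     return (v2 >> 128) != 0
-- ===== Notes on version B (the rewrite author's own statement) =====
-- stated objective: simpler
-- what changed: B replaces A's limb-by-limb carry-propagation loop by reassembling the 128-bit value from the four limbs, doing one bignum v*10+adder, then decomposing it back; the overflow bool is the value shifted right by 128.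
import Mathlib
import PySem

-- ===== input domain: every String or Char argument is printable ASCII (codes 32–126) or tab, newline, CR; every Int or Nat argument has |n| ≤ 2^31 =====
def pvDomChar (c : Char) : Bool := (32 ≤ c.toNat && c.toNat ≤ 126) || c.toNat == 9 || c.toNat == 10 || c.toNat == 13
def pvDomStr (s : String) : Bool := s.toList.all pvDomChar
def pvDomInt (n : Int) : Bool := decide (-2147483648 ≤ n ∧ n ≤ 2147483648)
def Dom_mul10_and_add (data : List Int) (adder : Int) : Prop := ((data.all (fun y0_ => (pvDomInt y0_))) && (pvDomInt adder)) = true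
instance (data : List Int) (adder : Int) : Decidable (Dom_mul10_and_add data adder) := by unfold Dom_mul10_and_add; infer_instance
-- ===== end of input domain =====

-- B replaces A's carry-propagation loop by one bignum multiply-add on the reassembled
-- 128-bit value followed by a shift for the overflow bit (objective: simpler).
-- A mutates data[0..3] in place; the Python B performs the same mutation; the
-- equivalence proved here is about the return value only.

-- ===== PORT A =====
-- the while loop: fuel 4 = the 4 iterations i = 3,2,1,0 (i = fuel - 1); `none` = IndexError
def mul10A_loop (data : List Int) (carry : Int) : Nat → Option Int
  | 0 => some carry
  | f+1 =>
    match PySem.List.pyGet? data (f : Int) with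
    | none => none
    | some d =>
      let work := d * 10 + carry
      mul10A_loop (data.set f (PySem.Int.mod work 4294967296))
        (PySem.Int.floordiv work 4294967296) f

def mul10_and_add (data : List Int) (adder : Int) : Bool :=
  match mul10A_loop data adder 4 with
  | some carry => decide (carry ≠ 0)
  | none => false   -- IndexError; excluded by Pre_

-- ===== PORT B =====
def mul10_and_add_alt (data : List Int) (adder : Int) : Bool :=
  match PySem.List.pyGet? data 0, PySem.List.pyGet? data 1,
        PySem.List.pyGet? data 2, PySem.List.pyGet? data 3 with
  | some a, some b, some c, some d =>
    let v : Int := a * 2^96 + b * 2^64 + c * 2^32 + d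
    let v2 : Int := v * 10 + adder
    decide (PySem.Int.floordiv v2 (2^128) ≠ 0)
  | _, _, _, _ => false   -- IndexError; excluded by Pre_

-- ===== PRECONDITION & SPEC =====
-- Pre_: both Pythons raise IndexError when data has fewer than 4 elements
def Pre_mul10_and_add (data : List Int) (adder : Int) : Prop := 4 ≤ data.length
instance (data : List Int) (adder : Int) : Decidable (Pre_mul10_and_add data adder) := by
  unfold Pre_mul10_and_add; infer_instance
def pvWitness_mul10_and_add : List Int × Int := ([1, 2, 3, 4], 5)

def Spec_mul10_and_add (data : List Int) (adder : Int) (out : Bool) : Prop := out = mul10_and_add_alt data adder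
instance (data : List Int) (adder : Int) (out : Bool) : Decidable (Spec_mul10_and_add data adder out) := by unfold Spec_mul10_and_add; infer_instance

-- ===== CLAIM (what is proved, stated in full; the proofs are below) =====
def Claim_equal_mul10_and_add : Prop := ∀ (data : List Int) (adder : Int), Dom_mul10_and_add data adder → Pre_mul10_and_add data adder → Spec_mul10_and_add data adder (mul10_and_add data adder)

-- ===== LEMMAS AND PROOFS =====

-- pyGet? on a ≥4-element literal list at the literal indices 0..3
theorem get4_0 (x0 x1 x2 x3 : Int) (r : List Int) :
    PySem.List.pyGet? (x0::x1::x2::x3::r) 0 = some x0 := by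
  rw [show (0:Int) = ((0:Nat):Int) from rfl, PySem.List.pyGet?_natCast]; rfl
theorem get4_1 (x0 x1 x2 x3 : Int) (r : List Int) :
    PySem.List.pyGet? (x0::x1::x2::x3::r) 1 = some x1 := by
  rw [show (1:Int) = ((1:Nat):Int) from rfl, PySem.List.pyGet?_natCast]; rfl
theorem get4_2 (x0 x1 x2 x3 : Int) (r : List Int) :
    PySem.List.pyGet? (x0::x1::x2::x3::r) 2 = some x2 := by
  rw [show (2:Int) = ((2:Nat):Int) from rfl, PySem.List.pyGet?_natCast]; rfl
theorem get4_3 (x0 x1 x2 x3 : Int) (r : List Int) :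
    PySem.List.pyGet? (x0::x1::x2::x3::r) 3 = some x3 := by
  rw [show (3:Int) = ((3:Nat):Int) from rfl, PySem.List.pyGet?_natCast]; rfl

-- the final carry of the four mul-add-carry steps = the reassembled value's high part
theorem carry_chain (a b c d e : Int) :
    PySem.Int.floordiv (a * 10 + PySem.Int.floordiv (b * 10 +
      PySem.Int.floordiv (c * 10 + PySem.Int.floordiv (d * 10 + e) 4294967296)
        4294967296) 4294967296) 4294967296
    = PySem.Int.floordiv ((a * 2^96 + b * 2^64 + c * 2^32 + d) * 10 + e) (2^128) := by
  have hB : (0 : Int) < 4294967296 := by norm_num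
  have h128 : (0 : Int) < 2^128 := by norm_num
  simp only [PySem.Int.floordiv_eq_ediv_of_pos hB, PySem.Int.floordiv_eq_ediv_of_pos h128]
  have hne : (4294967296 : Int) ≠ 0 := by norm_num
  rw [show ((a * 2^96 + b * 2^64 + c * 2^32 + d) * 10 + e : Int)
        = (d * 10 + e) + (c * 10 + (b * 10 + a * 10 * 4294967296) * 4294967296) * 4294967296
      from by ring,
      show (2:Int)^128 = 4294967296 * (4294967296 * (4294967296 * 4294967296)) from by norm_num,
      ← Int.ediv_ediv_of_nonneg (by norm_num),
      ← Int.ediv_ediv_of_nonneg (by norm_num),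
      ← Int.ediv_ediv_of_nonneg (by norm_num),
      Int.add_mul_ediv_right _ _ hne,
      show ((d * 10 + e) / 4294967296 + (c * 10 + (b * 10 + a * 10 * 4294967296) * 4294967296) : Int)
        = (c * 10 + (d * 10 + e) / 4294967296) + (b * 10 + a * 10 * 4294967296) * 4294967296
      from by ring,
      Int.add_mul_ediv_right _ _ hne,
      show ((c * 10 + (d * 10 + e) / 4294967296) / 4294967296 + (b * 10 + a * 10 * 4294967296) : Int)
        = (b * 10 + (c * 10 + (d * 10 + e) / 4294967296) / 4294967296) + (a * 10) * 4294967296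
      from by ring,
      Int.add_mul_ediv_right _ _ hne]
  congr 1
  ring

-- ===== VERDICT (by name: the statement is the Claim_ definition above) =====
theorem mul10_and_add_spec : Claim_equal_mul10_and_add := by
  intro data adder _ hpre
  unfold Spec_mul10_and_add
  match data, hpre with
  | d0 :: d1 :: d2 :: d3 :: rest, _ =>
    simp only [mul10_and_add, mul10_and_add_alt, mul10A_loop, List.set,
      PySem.List.pyGet?_natCast, List.getElem?_cons_succ, List.getElem?_cons_zero,
      get4_0, get4_1, get4_2, get4_3,
      Nat.cast_ofNat, carry_chain d0 d1 d2 d3 adder]
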